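-- pv_equiv track=rewrite | github.com/mrbartrns/programmers-algorithm | print_star/star_3.py | print_star
-- ===== SOURCE A (Python) =====
-- def print_star(n):
--     if n == 1:
--         return "*"
--     else:
--         string = ""
--         string += "*" * n + "\n"
--         string += print_star(n - 1)
--         return string
-- ===== SOURCE B (Python) =====
-- def print_star(n):
--     # Iterative/comprehension builder: rows collected top-down and joined once.
--     return "\n".join("*" * i for i in range(n, 0, -1))
-- ===== Notes on version B (the rewrite author's own statement) =====
-- stated objective: idiomatic
-- what changed: Replaces the recursive string concatenation with a single generator over range(n,0,-1) joined by one newline join.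
-- outside the precondition, e.g. on print_star(0): A raises RecursionError, B returns ''
import Mathlib
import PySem

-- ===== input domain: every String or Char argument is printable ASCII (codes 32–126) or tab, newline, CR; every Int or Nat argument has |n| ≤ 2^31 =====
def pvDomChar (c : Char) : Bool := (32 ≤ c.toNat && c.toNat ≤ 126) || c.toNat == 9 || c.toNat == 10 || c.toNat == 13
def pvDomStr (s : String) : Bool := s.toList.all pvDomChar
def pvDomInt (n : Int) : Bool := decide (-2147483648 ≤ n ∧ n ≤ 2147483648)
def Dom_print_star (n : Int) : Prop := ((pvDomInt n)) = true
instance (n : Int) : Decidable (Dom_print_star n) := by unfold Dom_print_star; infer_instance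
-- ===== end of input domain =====

-- B replaces A's recursive concatenation with one join over range(n,0,-1); same values for n ≥ 1 (A raises RecursionError for n ≤ 0).

-- ===== PORT A =====
-- fuel makes A's (otherwise non-terminating for n ≤ 0) recursion total; for n ≥ 1 the fuel n.toNat always suffices
def printStarGo (fuel : Nat) (n : Int) : List Char :=
  match fuel with
  | 0 => []
  | f + 1 =>
    if n == 1 then ['*']
    else PySem.List.pyRepeat ['*'] n ++ ['\n'] ++ printStarGo f (n - 1)

def print_star (n : Int) : String := String.ofList (printStarGo n.toNat n)

-- ===== PORT B =====
def print_star_alt (n : Int) : String :=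
  PySem.Str.join "\n" ((PySem.List.pyRange n 0 (-1)).map (fun i => String.ofList (PySem.List.pyRepeat ['*'] i)))

-- ===== PRECONDITION & SPEC =====
-- Pre_ excludes n ≤ 0, on which A recurses forever (RecursionError); A returns on exactly n ≥ 1.
def Pre_print_star (n : Int) : Prop := 1 ≤ n
instance (n : Int) : Decidable (Pre_print_star n) := by unfold Pre_print_star; infer_instance
def pvWitness_print_star : Int := (5)

def Spec_print_star (n : Int) (out : String) : Prop := out = print_star_alt n
instance (n : Int) (out : String) : Decidable (Spec_print_star n out) := by unfold Spec_print_star; infer_instance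

-- ===== CLAIM (what is proved, stated in full; the proofs are below) =====
def Claim_equal_print_star : Prop := ∀ (n : Int), Dom_print_star n → Pre_print_star n → Spec_print_star n (print_star n)

-- ===== LEMMAS AND PROOFS =====

lemma printStarGo_succ (f : Nat) (n : Int) (h : (n == 1) = false) :
    printStarGo (f + 1) n = PySem.List.pyRepeat ['*'] n ++ ['\n'] ++ printStarGo f (n - 1) := by
  simp only [printStarGo, h, Bool.false_eq_true, if_false, List.append_assoc]

lemma printStarGo_eq_join (k : Nat) :
    printStarGo (k + 1) ((k : Int) + 1) =
      PySem.Chars.join ['\n']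
        ((PySem.List.pyRange ((k : Int) + 1) 0 (-1)).map (fun i => PySem.List.pyRepeat ['*'] i)) := by
  induction k with
  | zero => decide
  | succ m ih =>
    have h1 : (((m : Int) + 1 + 1) == 1) = false := by
      rw [beq_eq_false_iff_ne]; omega
    have h2 : PySem.List.pyRange ((m : Int) + 1 + 1) 0 (-1) =
        ((m : Int) + 1 + 1) :: PySem.List.pyRange ((m : Int) + 1) 0 (-1) := by
      have h := PySem.List.pyRange_neg_one_cons (a := (m : Int) + 1 + 1) (b := 0) (by omega)
      simpa using h
    have h3 : PySem.List.pyRange ((m : Int) + 1) 0 (-1) =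
        ((m : Int) + 1) :: PySem.List.pyRange ((m : Int)) 0 (-1) := by
      have h := PySem.List.pyRange_neg_one_cons (a := (m : Int) + 1) (b := 0) (by omega)
      simpa using h
    have h4 : ((m : Int) + 1 + 1) - 1 = (m : Int) + 1 := by ring
    push_cast
    rw [printStarGo_succ (m + 1) _ h1, h4, ih, h2, List.map_cons, h3, List.map_cons,
      PySem.Chars.join_cons_cons, ← List.map_cons, ← h3]

theorem print_star_spec : Claim_equal_print_star := by
  intro n _ hpre
  unfold Spec_print_star print_star print_star_alt
  obtain ⟨k, hk⟩ : ∃ k : Nat, n = (k : Int) + 1 := ⟨(n - 1).toNat, by unfold Pre_print_star at hpre; omega⟩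
  subst hk
  have htn : ((k : Int) + 1).toNat = k + 1 := by omega
  rw [htn, printStarGo_eq_join]
  simp [PySem.Str.join, Function.comp_def, String.toList_ofList]
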